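-- pv_equiv track=rewrite | github.com/mjbommar/glaurung | scripts/recover_source.py | _merge_type_decls
-- ===== SOURCE A (Python) =====
-- from typing import Dict, List, Optional, Tuple
--
-- def _merge_type_decls(
--     decls: List[Tuple[str, str, str]],
-- ) -> Dict[str, str]:
--     """Pick a single canonical declaration per type name.
--
--     When the same struct/class is declared multiple times across
--     different functions with different fields, prefer the *richest*
--     declaration (most fields, longest body). The rewriter occasionally
--     emits empty stubs (``class HelloWorld { public: void f(); };``)
--     alongside richer declarations elsewhere — taking the longest one
--     preserves field information that the per-function rewrites depend on.
--     """
--     by_name: Dict[str, str] = {}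
--     by_name_size: Dict[str, int] = {}
--     for kw, name, decl in decls:
--         size = decl.count("\n") * 100 + len(decl)
--         if name not in by_name or size > by_name_size[name]:
--             by_name[name] = decl
--             by_name_size[name] = size
--     return by_name
-- ===== SOURCE B (Python) =====
-- from typing import Dict, List, Tuple
--
-- def _merge_type_decls(
--     decls: List[Tuple[str, str, str]],
-- ) -> Dict[str, str]:
--     """Group declarations by name, then pick the richest one per group.
--
--     Groups keep encounter order, so ``max`` (which returns the first
--     maximal element) reproduces the first-wins tie rule of a strict
--     running maximum.
--     """
--     groups: Dict[str, List[str]] = {}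
--     for kw, name, decl in decls:
--         groups.setdefault(name, []).append(decl)
--     return {
--         name: max(group, key=lambda d: d.count("\n") * 100 + len(d))
--         for name, group in groups.items()
--     }
-- ===== Notes on version B (the rewrite author's own statement) =====
-- stated objective: alternative
-- what changed: A keeps a running richest-so-far decl plus a parallel size dict updated in one online pass; B first groups all decls by name (encounter order) and then picks max(group, key=size) per group, relying on max returning the first maximal element to reproduce A's strict-greater first-wins ties.
import Mathlib
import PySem

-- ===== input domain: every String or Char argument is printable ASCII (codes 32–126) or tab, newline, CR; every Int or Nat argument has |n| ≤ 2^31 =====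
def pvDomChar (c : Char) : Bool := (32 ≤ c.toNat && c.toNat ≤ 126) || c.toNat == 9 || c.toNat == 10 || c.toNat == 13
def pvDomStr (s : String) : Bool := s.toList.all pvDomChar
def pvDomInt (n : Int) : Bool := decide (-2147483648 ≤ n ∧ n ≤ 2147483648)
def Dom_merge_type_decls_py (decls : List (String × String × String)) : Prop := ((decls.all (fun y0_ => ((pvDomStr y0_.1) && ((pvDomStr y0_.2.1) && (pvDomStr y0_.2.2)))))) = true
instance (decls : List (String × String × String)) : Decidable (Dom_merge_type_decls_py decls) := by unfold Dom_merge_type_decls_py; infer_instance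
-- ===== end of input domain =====

-- B re-decomposes A's running-maximum loop (two parallel dicts) into group-by-name then
-- pick the max of each group; objective: alternative decomposition, same output order and ties.

-- size key shared by both Pythons verbatim: decl.count("\n") * 100 + len(decl)
def pvSz (d : String) : Int := (PySem.Str.count d "\n" : Int) * 100 + PySem.Str.len d

-- ===== PORT A =====
-- One pass keeping, per name, the richest decl so far and its size.
-- Python reads by_name_size[name] only when name ∈ by_name, where it is always set:
-- getD … 0 is exact there.
def pvStepA (st : PySem.Dict String String × PySem.Dict String Int)
    (t : String × String × String) : PySem.Dict String String × PySem.Dict String Int :=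
  let size := pvSz t.2.2
  if st.1.contains t.2.1 = false ∨ st.2.getD t.2.1 0 < size then
    (st.1.insert t.2.1 t.2.2, st.2.insert t.2.1 size)
  else st

def merge_type_decls_py (decls : List (String × String × String)) : List (String × String) :=
  (decls.foldl pvStepA (PySem.Dict.empty, PySem.Dict.empty)).1.items

-- ===== PORT B =====
-- groups.setdefault(name, []).append(decl)
def pvStepB (g : PySem.Dict String (List String)) (t : String × String × String) :
    PySem.Dict String (List String) :=
  g.modify t.2.1 [] (fun l => l ++ [t.2.2])

-- max(group, key=…): first maximal element; groups are never empty, so getD "" never fires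
def pvBest (g : List String) : String := (PySem.List.max? g pvSz).getD ""

def merge_type_decls_py_alt (decls : List (String × String × String)) : List (String × String) :=
  (decls.foldl pvStepB PySem.Dict.empty).items.map (fun p => (p.1, pvBest p.2))

-- ===== PRECONDITION & SPEC =====
def Spec_merge_type_decls_py (decls : List (String × String × String)) (out : List (String × String)) : Prop := out = merge_type_decls_py_alt decls
instance (decls : List (String × String × String)) (out : List (String × String)) : Decidable (Spec_merge_type_decls_py decls out) := by unfold Spec_merge_type_decls_py; infer_instance

-- ===== CLAIM (what is proved, stated in full; the proofs are below) =====
def Claim_equal_merge_type_decls_py : Prop := ∀ (decls : List (String × String × String)), Dom_merge_type_decls_py decls → Spec_merge_type_decls_py decls (merge_type_decls_py decls)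

-- ===== LEMMAS AND PROOFS =====

lemma pvBest_singleton (d : String) : pvBest [d] = d := by
  simp [pvBest, PySem.List.max?]

lemma pvBest_append (g : List String) (d : String) (hg : g ≠ []) :
    pvBest (g ++ [d]) = if pvSz (pvBest g) < pvSz d then d else pvBest g := by
  obtain ⟨m, hm⟩ : ∃ m, PySem.List.max? g pvSz = some m := by
    cases h : PySem.List.max? g pvSz with
    | none => exact absurd ((PySem.List.max?_eq_none_iff g pvSz).mp h) hg
    | some m => exact ⟨m, rfl⟩
  have hla : PySem.List.max? (g ++ [d]) pvSz
      = if pvSz m < pvSz d then some d else some m := by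
    unfold PySem.List.max? at hm ⊢
    rw [List.foldl_append, hm]
    simp
  by_cases h : pvSz m < pvSz d <;> simp [pvBest, hm, hla, h]

-- a dict whose items are a value-map of G's items has the same contains / keys
lemma pv_contains_of_map {ν ν' : Type} (b : PySem.Dict String ν') (G : PySem.Dict String ν)
    (f : String × ν → ν') (h : b.items = G.items.map (fun p => (p.1, f p))) (k : String) :
    b.contains k = G.contains k := by
  simp [PySem.Dict.contains, h, List.any_map, Function.comp_def]

lemma pv_keys_of_map {ν ν' : Type} (b : PySem.Dict String ν') (G : PySem.Dict String ν)
    (f : String × ν → ν') (h : b.items = G.items.map (fun p => (p.1, f p))) :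
    b.keys = G.keys := by
  simp [PySem.Dict.keys, h, List.map_map, Function.comp_def]

-- the coupling invariant, pushed through the two folds
lemma pv_inv (decls : List (String × String × String)) :
    ∀ (G : PySem.Dict String (List String)) (bn : PySem.Dict String String)
      (bs : PySem.Dict String Int),
      G.keys.Nodup →
      (∀ p ∈ G.items, p.2 ≠ []) →
      bn.items = G.items.map (fun p => (p.1, pvBest p.2)) →
      bs.items = G.items.map (fun p => (p.1, pvSz (pvBest p.2))) →
      (decls.foldl pvStepA (bn, bs)).1.items
        = (decls.foldl pvStepB G).items.map (fun p => (p.1, pvBest p.2)) := by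
  induction decls with
  | nil => intro G bn bs _ _ hbn _; simpa using hbn
  | cons t rest ih =>
    intro G bn bs hnd hne hbn hbs
    rw [List.foldl_cons, List.foldl_cons]
    have hc : bn.contains t.2.1 = G.contains t.2.1 := pv_contains_of_map bn G _ hbn t.2.1
    have hknd : bs.keys.Nodup := (pv_keys_of_map bs G _ hbs) ▸ hnd
    cases hGc : G.contains t.2.1 with
    | false =>
      -- new name: both sides append a fresh entry
      have hA : pvStepA (bn, bs) t
          = (bn.insert t.2.1 t.2.2, bs.insert t.2.1 (pvSz t.2.2)) := by
        simp [pvStepA, hc, hGc]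
      have hB : pvStepB G t = G.insert t.2.1 [t.2.2] := by
        simp [pvStepB, PySem.Dict.modify, PySem.Dict.getD_of_not_contains _ _ hGc]
      rw [hA, hB]
      apply ih
      · rw [PySem.Dict.keys_insert_of_not_contains _ _ hGc]
        have hnm : t.2.1 ∉ G.keys := fun hm =>
          by simp [(PySem.Dict.contains_iff_mem_keys G t.2.1).mpr hm] at hGc
        refine hnd.append (List.nodup_singleton _) ?_
        intro a ha hb
        rw [List.mem_singleton] at hb
        exact hnm (hb ▸ ha)
      · intro p hp
        rw [PySem.Dict.items_insert_of_not_contains _ _ hGc] at hp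
        rcases List.mem_append.mp hp with h | h
        · exact hne p h
        · simp at h; subst h; simp
      · rw [PySem.Dict.items_insert_of_not_contains _ _ (hc.trans hGc),
            PySem.Dict.items_insert_of_not_contains _ _ hGc, List.map_append, hbn]
        simp [pvBest_singleton]
      · rw [PySem.Dict.items_insert_of_not_contains _ _
              ((pv_contains_of_map bs G _ hbs t.2.1).trans hGc),
            PySem.Dict.items_insert_of_not_contains _ _ hGc, List.map_append, hbs]
        simp [pvBest_singleton]
    | true =>
      -- name already grouped: G holds group g, A holds pvBest g and its size
      obtain ⟨g, hg⟩ : ∃ g, G.get? t.2.1 = some g := by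
        cases h : G.get? t.2.1 with
        | none =>
          exfalso
          have := PySem.Dict.contains_eq_isSome_get? (d := G) (k := t.2.1)
          rw [hGc, h] at this; simp at this
        | some g => exact ⟨g, rfl⟩
      have hgmem : (t.2.1, g) ∈ G.items := PySem.Dict.mem_items_of_get?_eq_some G hg
      have hgne : g ≠ [] := hne _ hgmem
      have hbsval : bs.getD t.2.1 0 = pvSz (pvBest g) := by
        have : (t.2.1, pvSz (pvBest g)) ∈ bs.items := by
          rw [hbs]; exact List.mem_map.mpr ⟨(t.2.1, g), hgmem, rfl⟩
        exact PySem.Dict.getD_of_mem_items bs this hknd 0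
      have hB : pvStepB G t = G.insert t.2.1 (g ++ [t.2.2]) := by
        simp [pvStepB, PySem.Dict.modify, PySem.Dict.getD_of_get?_eq_some _ _ hg]
      have hGitems : (G.insert t.2.1 (g ++ [t.2.2])).items
          = G.items.map (fun p => if p.1 == t.2.1 then (t.2.1, g ++ [t.2.2]) else p) :=
        PySem.Dict.items_insert_of_contains _ _ hGc
      -- uniqueness: any item of G keyed t.2.1 carries exactly g
      have huniq : ∀ p ∈ G.items, p.1 = t.2.1 → p.2 = g := by
        intro p hp h1
        have : G.get? t.2.1 = some p.2 := by
          apply PySem.Dict.get?_of_mem_items G _ hnd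
          rw [← h1]; exact hp
        rw [hg] at this; exact (Option.some.injEq _ _ ▸ this).symm
      rw [hB]
      by_cases hlt : pvSz (pvBest g) < pvSz t.2.2
      · -- richer: A overwrites
        have hA : pvStepA (bn, bs) t
            = (bn.insert t.2.1 t.2.2, bs.insert t.2.1 (pvSz t.2.2)) := by
          simp [pvStepA, hbsval, hlt]
        rw [hA]
        apply ih
        · rw [PySem.Dict.keys_insert_of_contains _ _ hGc]; exact hnd
        · intro p hp
          rw [hGitems] at hp
          obtain ⟨q, hq, hqe⟩ := List.mem_map.mp hp
          by_cases h1 : (q.1 == t.2.1) = true <;> simp [h1] at hqe <;> rw [← hqe]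
          · simp
          · exact hne q hq
        · rw [PySem.Dict.items_insert_of_contains _ _ (hc.trans hGc),
              hGitems, hbn, List.map_map, List.map_map]
          apply List.map_congr_left
          intro p hp
          by_cases h1 : p.1 = t.2.1
          · simp [h1, pvBest_append g t.2.2 hgne, hlt]
          · simp [h1]
        · rw [PySem.Dict.items_insert_of_contains _ _
                ((pv_contains_of_map bs G _ hbs t.2.1).trans hGc),
              hGitems, hbs, List.map_map, List.map_map]
          apply List.map_congr_left
          intro p hp
          by_cases h1 : p.1 = t.2.1
          · simp [h1, pvBest_append g t.2.2 hgne, hlt]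
          · simp [h1]
      · -- not richer: A keeps its state, B's group grows but its max is unchanged
        have hA : pvStepA (bn, bs) t = (bn, bs) := by
          simp [pvStepA, hbsval, hlt, hc, hGc]
        rw [hA]
        apply ih
        · rw [PySem.Dict.keys_insert_of_contains _ _ hGc]; exact hnd
        · intro p hp
          rw [hGitems] at hp
          obtain ⟨q, hq, hqe⟩ := List.mem_map.mp hp
          by_cases h1 : (q.1 == t.2.1) = true <;> simp [h1] at hqe <;> rw [← hqe]
          · simp
          · exact hne q hq
        · rw [hGitems, hbn, List.map_map]
          apply List.map_congr_left
          intro p hp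
          by_cases h1 : p.1 = t.2.1
          · have h2 := huniq p hp h1
            simp [h1, h2, pvBest_append g t.2.2 hgne, hlt]
          · simp [h1]
        · rw [hGitems, hbs, List.map_map]
          apply List.map_congr_left
          intro p hp
          by_cases h1 : p.1 = t.2.1
          · have h2 := huniq p hp h1
            simp [h1, h2, pvBest_append g t.2.2 hgne, hlt]
          · simp [h1]

-- ===== VERDICT (by name: the statement is the Claim_ definition above) =====
theorem merge_type_decls_py_spec : Claim_equal_merge_type_decls_py := by
  intro decls _
  unfold Spec_merge_type_decls_py merge_type_decls_py merge_type_decls_py_alt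
  exact pv_inv decls PySem.Dict.empty PySem.Dict.empty PySem.Dict.empty
    (by simp [PySem.Dict.keys, PySem.Dict.empty])
    (by simp [PySem.Dict.empty])
    (by simp [PySem.Dict.empty]) (by simp [PySem.Dict.empty])
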